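-- pv_equiv track=rewrite | github.com/akatsuyama/LigX | LigX/LigX_core.py | atomname_change_before_link_n_c
-- ===== SOURCE A (Python) =====
-- def atomname_change_before_link_n_c(atom_list):
--     atom_list = ['C' if x == 'YCA' else x for x in atom_list]
--     atom_list = ['C' if x == 'YCO' else x for x in atom_list]
--     atom_list = ['C' if x == 'CX_0' else x for x in atom_list]
--     atom_list = ['O' if x == 'YO' else x for x in atom_list]
--     atom_list = ['S' if x == 'YS' else x for x in atom_list]
--     atom_list = ['S' if x == 'YSA' else x for x in atom_list]
--     atom_list = ['N' if x == 'YNA' else x for x in atom_list]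
--     atom_list = ['N' if x == 'YN3' else x for x in atom_list]
--     atom_list = ['N' if x == 'YN2' else x for x in atom_list]
--     return atom_list
-- ===== SOURCE B (Python) =====
-- # The special names (other than CX_0) are 'Y' + element symbol + optional suffix,
-- # so the replacement is derived from the name's second letter instead of a lookup table.
-- _Y_NAMES = frozenset(('YCA', 'YCO', 'YO', 'YS', 'YSA', 'YNA', 'YN3', 'YN2'))
--
-- def atomname_change_before_link_n_c(atom_list):
--     out = []
--     for x in atom_list:
--         if x == 'CX_0':
--             out.append('C')
--         elif x in _Y_NAMES:
--             out.append(x[1])  # element symbol = letter after the 'Y' prefix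
--         else:
--             out.append(x)
--     return out
-- ===== Notes on version B (the rewrite author's own statement) =====
-- stated objective: simpler
-- what changed: Nine whole-list replacement passes with hard-coded outputs are replaced by one accumulator pass that derives the element symbol from the atom name itself (the letter after the 'Y' prefix, x[1]), with CX_0 as the single special case; no output table exists in B.
import Mathlib
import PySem

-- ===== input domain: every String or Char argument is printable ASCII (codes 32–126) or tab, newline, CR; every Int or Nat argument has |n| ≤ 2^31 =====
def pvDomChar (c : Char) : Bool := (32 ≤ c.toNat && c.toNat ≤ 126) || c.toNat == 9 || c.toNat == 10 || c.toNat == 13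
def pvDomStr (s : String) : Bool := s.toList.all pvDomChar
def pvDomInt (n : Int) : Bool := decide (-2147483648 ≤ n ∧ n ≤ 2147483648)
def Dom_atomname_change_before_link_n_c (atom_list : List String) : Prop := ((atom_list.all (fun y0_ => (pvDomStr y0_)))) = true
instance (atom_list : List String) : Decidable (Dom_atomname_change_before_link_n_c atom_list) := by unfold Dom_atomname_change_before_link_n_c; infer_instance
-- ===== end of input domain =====

-- ===== PORT A =====
-- One honest line: B replaces A's nine hard-coded replacement passes by a single
-- accumulator pass that derives the element from the name's letter after 'Y'; objective: simpler.
def atomname_change_before_link_n_c (atom_list : List String) : List String :=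
  (((((((((atom_list.map (fun x => if x == "YCA" then "C" else x)).map
    (fun x => if x == "YCO" then "C" else x)).map
    (fun x => if x == "CX_0" then "C" else x)).map
    (fun x => if x == "YO" then "O" else x)).map
    (fun x => if x == "YS" then "S" else x)).map
    (fun x => if x == "YSA" then "S" else x)).map
    (fun x => if x == "YNA" then "N" else x)).map
    (fun x => if x == "YN3" then "N" else x)).map
    (fun x => if x == "YN2" then "N" else x))

-- ===== PORT B =====
-- the module-level frozenset _Y_NAMES from Source B
def yNames : PySem.Set String :=
  PySem.Set.ofList ["YCA", "YCO", "YO", "YS", "YSA", "YNA", "YN3", "YN2"]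

-- loop body: what Source B appends for one atom name x
def elemOf (x : String) : String :=
  if x == "CX_0" then "C"
  else if PySem.Set.contains yNames x then
    -- x[1]: defined for every member of yNames (all have length ≥ 2)
    match PySem.Str.pyGet? x 1 with
    | some c => String.ofList [c]
    | none => x
  else x

def atomname_change_before_link_n_c_alt (atom_list : List String) : List String :=
  atom_list.foldl (fun out x => out ++ [elemOf x]) []

-- ===== PRECONDITION & SPEC =====
def Spec_atomname_change_before_link_n_c (atom_list : List String) (out : List String) : Prop := out = atomname_change_before_link_n_c_alt atom_list
instance (atom_list : List String) (out : List String) : Decidable (Spec_atomname_change_before_link_n_c atom_list out) := by unfold Spec_atomname_change_before_link_n_c; infer_instance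

-- ===== CLAIM =====
def Claim_equal_atomname_change_before_link_n_c : Prop := ∀ (atom_list : List String), Dom_atomname_change_before_link_n_c atom_list → Spec_atomname_change_before_link_n_c atom_list (atomname_change_before_link_n_c atom_list)

-- ===== LEMMAS AND PROOFS =====
lemma alt_eq_map (l : List String) :
    atomname_change_before_link_n_c_alt l = l.map elemOf := by
  simp only [atomname_change_before_link_n_c_alt, PySem.List.foldl_append_singleton_eq_map]
  induction l with
  | nil => rfl
  | cons h t ih => simp [ih]

lemma pointwise_eq (x : String) :
    (fun x => if x == "YN2" then "N" else x)
      ((fun x => if x == "YN3" then "N" else x)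
      ((fun x => if x == "YNA" then "N" else x)
      ((fun x => if x == "YSA" then "S" else x)
      ((fun x => if x == "YS" then "S" else x)
      ((fun x => if x == "YO" then "O" else x)
      ((fun x => if x == "CX_0" then "C" else x)
      ((fun x => if x == "YCO" then "C" else x)
      ((fun x => if x == "YCA" then "C" else x) x)))))))) = elemOf x := by
  by_cases h1 : x = "YCA"
  · subst h1; decide
  by_cases h2 : x = "YCO"
  · subst h2; decide
  by_cases h3 : x = "CX_0"
  · subst h3; decide
  by_cases h4 : x = "YO"
  · subst h4; decide
  by_cases h5 : x = "YS"
  · subst h5; decide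
  by_cases h6 : x = "YSA"
  · subst h6; decide
  by_cases h7 : x = "YNA"
  · subst h7; decide
  by_cases h8 : x = "YN3"
  · subst h8; decide
  by_cases h9 : x = "YN2"
  · subst h9; decide
  simp [elemOf, yNames, PySem.Set.contains, PySem.Set.ofList,
    h1, h2, h3, h4, h5, h6, h7, h8, h9]

lemma ports_eq (l : List String) :
    atomname_change_before_link_n_c l = atomname_change_before_link_n_c_alt l := by
  rw [alt_eq_map]
  induction l with
  | nil => rfl
  | cons h t ih =>
    simp only [atomname_change_before_link_n_c, List.map_cons] at ih ⊢
    exact congrArg₂ List.cons (pointwise_eq h) ih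

-- ===== VERDICT =====
theorem atomname_change_before_link_n_c_spec : Claim_equal_atomname_change_before_link_n_c := by
  intro atom_list _
  exact ports_eq atom_list
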